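-- pv_equiv track=rewrite | github.com/panditsa/wave | wave_lang/kernel/wave/asm/wave_asm/test/e2e/compare_backends.py | count_total_instructions
-- ===== SOURCE A (Python) =====
-- def is_label_line(line: str) -> bool:
--     """Check if line is a label (e.g., 'foo:', 'L_loop:')."""
--     stripped = line.strip()
--     if stripped.endswith(":"):
--         label_name = stripped[:-1]
--         return label_name.replace("_", "").replace(".", "").isalnum()
--     if ":" in stripped:
--         before_colon = stripped.split(":")[0]
--         if before_colon.replace("_", "").replace(
--             ".", ""
--         ).isalnum() and not before_colon.startswith(("s[", "v[")):
--             return True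
--     return False
--
-- def count_total_instructions(asm: str) -> int:
--     """Count total instructions in assembly."""
--     count = 0
--     in_kernel = False
--     for line in asm.split("\n"):
--         stripped = line.strip()
--         if not stripped:
--             continue
--         if (
--             stripped.startswith(".")
--             or stripped.startswith("#")
--             or stripped.startswith("//")
--             or stripped.startswith(";")
--         ):
--             continue
--         if is_label_line(stripped):
--             in_kernel = True
--             continue
--         if in_kernel and stripped and not stripped.startswith("."):
--             count += 1
--     return count
-- ===== SOURCE B (Python) =====
-- def is_label_line(line: str) -> bool:
--     """Check if line is a label (e.g., 'foo:', 'L_loop:')."""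
--     stripped = line.strip()
--     if stripped.endswith(":"):
--         label_name = stripped[:-1]
--         return label_name.replace("_", "").replace(".", "").isalnum()
--     if ":" in stripped:
--         before_colon = stripped.split(":")[0]
--         if before_colon.replace("_", "").replace(
--             ".", ""
--         ).isalnum() and not before_colon.startswith(("s[", "v[")):
--             return True
--     return False
--
-- def _significant(s: str) -> bool:
--     return bool(s) and not s.startswith((".", "#", "//", ";"))
--
-- def count_total_instructions(asm: str) -> int:
--     """Count total instructions in assembly (locate first label, count tail)."""
--     lines = [l.strip() for l in asm.split("\n")]
--     pivot = next((i for i, s in enumerate(lines)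
--                   if _significant(s) and is_label_line(s)), None)
--     if pivot is None:
--         return 0
--     return sum(1 for s in lines[pivot + 1:]
--                if _significant(s) and not is_label_line(s))
-- ===== Notes on version B (the rewrite author's own statement) =====
-- stated objective: alternative
-- what changed: Replaces A's single stateful latch loop by a two-phase locate-then-count: find the index of the first significant label line, then count the significant non-label lines strictly after it.
import Mathlib
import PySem

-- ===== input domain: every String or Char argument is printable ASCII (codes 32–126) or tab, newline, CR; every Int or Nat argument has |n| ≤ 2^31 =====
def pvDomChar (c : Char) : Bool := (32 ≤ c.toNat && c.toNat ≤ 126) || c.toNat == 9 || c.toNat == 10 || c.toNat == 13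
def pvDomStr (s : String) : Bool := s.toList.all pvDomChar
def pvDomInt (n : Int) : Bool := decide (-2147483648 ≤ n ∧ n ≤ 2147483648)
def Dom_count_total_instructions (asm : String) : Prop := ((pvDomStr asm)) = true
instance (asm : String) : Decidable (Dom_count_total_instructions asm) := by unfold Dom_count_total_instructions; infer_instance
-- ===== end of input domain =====

-- B replaces A's single stateful latch loop by a locate-first-label-then-count-tail
-- decomposition (alternative structure, same cost); return value only, no mutation.

-- ===== PORT A =====
-- shared helper: literal port of is_label_line (both Pythons contain this helper verbatim)
def is_label_line (line : String) : Bool :=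
  let stripped := PySem.Str.strip line
  if PySem.Str.endswith stripped ":" then
    let label_name := PySem.Str.slice stripped none (some (-1))
    PySem.Str.strIsalnum (PySem.Str.replace (PySem.Str.replace label_name "_" "") "." "")
  else if PySem.Str.isIn ":" stripped then
    let before_colon := ((PySem.Str.split? stripped ":").getD []).headD ""
    if PySem.Str.strIsalnum (PySem.Str.replace (PySem.Str.replace before_colon "_" "") "." "")
        && !(PySem.Str.startswith before_colon "s[" || PySem.Str.startswith before_colon "v[")
    then true else false
  else false

-- A's loop body: state (count, in_kernel)
def pvStepA (st : Int × Bool) (line : String) : Int × Bool :=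
  let stripped := PySem.Str.strip line
  if stripped == "" then st
  else if PySem.Str.startswith stripped "." || PySem.Str.startswith stripped "#"
        || PySem.Str.startswith stripped "//" || PySem.Str.startswith stripped ";" then st
  else if is_label_line stripped then (st.1, true)
  else if st.2 && !(stripped == "") && !PySem.Str.startswith stripped "." then (st.1 + 1, st.2)
  else st

def count_total_instructions (asm : String) : Int :=
  (((PySem.Str.split? asm "\n").getD []).foldl pvStepA (0, false)).1

-- ===== PORT B =====
def pvSignificant (s : String) : Bool :=
  !(s == "") && !(PySem.Str.startswith s "." || PySem.Str.startswith s "#"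
        || PySem.Str.startswith s "//" || PySem.Str.startswith s ";")

def count_total_instructions_alt (asm : String) : Int :=
  let lines := ((PySem.Str.split? asm "\n").getD []).map PySem.Str.strip
  match lines.findIdx? (fun s => pvSignificant s && is_label_line s) with
  | none => 0
  | some i =>
      (((lines.drop (i + 1)).filter (fun s => pvSignificant s && !is_label_line s)).length : Int)

-- ===== PRECONDITION & SPEC =====
def Spec_count_total_instructions (asm : String) (out : Int) : Prop := out = count_total_instructions_alt asm
instance (asm : String) (out : Int) : Decidable (Spec_count_total_instructions asm out) := by unfold Spec_count_total_instructions; infer_instance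

-- ===== CLAIM (what is proved, stated in full; the proofs are below) =====
def Claim_equal_count_total_instructions : Prop := ∀ (asm : String), Dom_count_total_instructions asm → Spec_count_total_instructions asm (count_total_instructions asm)

-- ===== LEMMAS AND PROOFS =====

-- predicates on a STRIPPED line
def pvGood (s : String) : Bool := pvSignificant s && !is_label_line s
def pvPivot (s : String) : Bool := pvSignificant s && is_label_line s

-- the common result over the raw line list
def pvTail (l : List String) : Int :=
  match l.findIdx? (fun line => pvPivot (PySem.Str.strip line)) with
  | none => 0
  | some i => ((l.drop (i + 1)).countP (fun line => pvGood (PySem.Str.strip line)) : Int)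

theorem pvStepA_true (c : Int) (line : String) :
    pvStepA (c, true) line = (c + (if pvGood (PySem.Str.strip line) then 1 else 0), true) := by
  simp only [pvStepA, pvGood, pvSignificant]
  by_cases h0 : (PySem.Str.strip line == "") = true
  · simp only [h0]; simp
  · rw [Bool.not_eq_true] at h0
    simp only [h0]
    by_cases h1 : (PySem.Str.startswith (PySem.Str.strip line) "."
        || PySem.Str.startswith (PySem.Str.strip line) "#"
        || PySem.Str.startswith (PySem.Str.strip line) "//"
        || PySem.Str.startswith (PySem.Str.strip line) ";") = true
    · simp only [h1]; simp
    · rw [Bool.not_eq_true] at h1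
      simp only [h1]
      by_cases h2 : is_label_line (PySem.Str.strip line) = true
      · simp only [h2]; simp
      · rw [Bool.not_eq_true] at h2
        have hs : PySem.Str.startswith (PySem.Str.strip line) "." = false := by
          simp only [Bool.or_eq_false_iff] at h1
          exact h1.1.1.1
        simp only [h2, hs]; simp

theorem pvStepA_false (c : Int) (line : String)
    (hp : pvPivot (PySem.Str.strip line) = false) :
    pvStepA (c, false) line = (c, false) := by
  simp only [pvStepA]
  by_cases h0 : (PySem.Str.strip line == "") = true
  · simp only [h0]; simp
  · rw [Bool.not_eq_true] at h0
    simp only [h0]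
    by_cases h1 : (PySem.Str.startswith (PySem.Str.strip line) "."
        || PySem.Str.startswith (PySem.Str.strip line) "#"
        || PySem.Str.startswith (PySem.Str.strip line) "//"
        || PySem.Str.startswith (PySem.Str.strip line) ";") = true
    · simp only [h1]; simp
    · rw [Bool.not_eq_true] at h1
      have hlab : is_label_line (PySem.Str.strip line) = false := by
        unfold pvPivot pvSignificant at hp
        rw [h0, h1] at hp; simpa using hp
      simp only [h1, hlab]; simp

theorem pvStepA_latched (l : List String) : ∀ c : Int,
    l.foldl pvStepA (c, true)
      = (c + (l.countP (fun line => pvGood (PySem.Str.strip line)) : Int), true) := by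
  induction l with
  | nil => intro c; simp
  | cons line tl ih =>
    intro c
    rw [List.foldl_cons, pvStepA_true, ih, List.countP_cons]
    by_cases hg : pvGood (PySem.Str.strip line) = true
    · simp only [hg, if_true]
      simp only [Prod.mk.injEq]
      refine ⟨by push_cast; ring, trivial⟩
    · rw [Bool.not_eq_true] at hg
      simp [hg]

theorem pvStepA_unlatched (l : List String) : ∀ c : Int,
    (l.foldl pvStepA (c, false)).1 = c + pvTail l := by
  induction l with
  | nil => intro c; simp [pvTail]
  | cons line tl ih =>
    intro c
    cases hp : pvPivot (PySem.Str.strip line) with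
    | true =>
      have hsig : pvSignificant (PySem.Str.strip line) = true := by
        unfold pvPivot at hp; exact (Bool.and_eq_true_iff.mp hp).1
      have hlab : is_label_line (PySem.Str.strip line) = true := by
        unfold pvPivot at hp; exact (Bool.and_eq_true_iff.mp hp).2
      unfold pvSignificant at hsig
      rw [Bool.and_eq_true_iff] at hsig
      obtain ⟨h0, h1⟩ := hsig
      rw [Bool.not_eq_true'] at h0 h1
      have hstep : pvStepA (c, false) line = (c, true) := by
        simp only [pvStepA]
        simp only [h0, h1, hlab]; simp
      rw [List.foldl_cons, hstep, pvStepA_latched]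
      simp [pvTail, List.findIdx?_cons, hp]
    | false =>
      have htail : pvTail (line :: tl) = pvTail tl := by
        unfold pvTail
        rw [List.findIdx?_cons]
        simp only [hp, Bool.false_eq_true, if_false]
        cases hfi : tl.findIdx? (fun line => pvPivot (PySem.Str.strip line)) with
        | none => simp
        | some i => simp [List.drop_succ_cons]
      rw [List.foldl_cons, pvStepA_false c line hp, ih, htail]

theorem alt_eq_tail (l : List String) :
    (match (l.map PySem.Str.strip).findIdx? (fun s => pvSignificant s && is_label_line s) with
      | none => (0 : Int)
      | some i =>
          ((((l.map PySem.Str.strip).drop (i + 1)).filter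
              (fun s => pvSignificant s && !is_label_line s)).length : Int)) = pvTail l := by
  unfold pvTail
  rw [List.findIdx?_map]
  cases hfi : l.findIdx? ((fun s => pvSignificant s && is_label_line s) ∘ PySem.Str.strip) with
  | none =>
    have : l.findIdx? (fun line => pvPivot (PySem.Str.strip line)) = none := by
      rw [← hfi]; rfl
    simp [this]
  | some i =>
    have : l.findIdx? (fun line => pvPivot (PySem.Str.strip line)) = some i := by
      rw [← hfi]; rfl
    simp only [this]
    rw [← List.map_drop, ← List.countP_eq_length_filter, List.countP_map]
    rfl

-- ===== VERDICT (by name: the statement is the Claim_ definition above) =====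
theorem count_total_instructions_spec : Claim_equal_count_total_instructions := by
  intro asm _
  unfold Spec_count_total_instructions count_total_instructions count_total_instructions_alt
  rw [pvStepA_unlatched, alt_eq_tail]
  ring
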